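-- pv_equiv track=rewrite | github.com/AlchemistX/Playground | CodeJam/2017/Problem_3/solve_set1.py | solve
-- ===== SOURCE A (Python) =====
-- def solve(R, B, P):
--     r, b = 0, 0
--     if len(P) == 0:
--         for i in range(len(R) - 1):
--             r = r + (R[i+1] - R[i])
--         for i in range(len(B) - 1):
--             b = b + (B[i+1] - B[i])
--     else:
--         pass
--     return r + b
-- ===== SOURCE B (Python) =====
-- def solve(R, B, P):
--     if P:
--         return 0
--     r = R[-1] - R[0] if R else 0
--     b = B[-1] - B[0] if B else 0
--     return r + b
-- ===== Notes on version B (the rewrite author's own statement) =====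
-- stated objective: simpler
-- what changed: Replaces the two loops summing consecutive differences with the closed-form telescoping value last-first for each list (0 for an empty list).
import Mathlib
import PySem

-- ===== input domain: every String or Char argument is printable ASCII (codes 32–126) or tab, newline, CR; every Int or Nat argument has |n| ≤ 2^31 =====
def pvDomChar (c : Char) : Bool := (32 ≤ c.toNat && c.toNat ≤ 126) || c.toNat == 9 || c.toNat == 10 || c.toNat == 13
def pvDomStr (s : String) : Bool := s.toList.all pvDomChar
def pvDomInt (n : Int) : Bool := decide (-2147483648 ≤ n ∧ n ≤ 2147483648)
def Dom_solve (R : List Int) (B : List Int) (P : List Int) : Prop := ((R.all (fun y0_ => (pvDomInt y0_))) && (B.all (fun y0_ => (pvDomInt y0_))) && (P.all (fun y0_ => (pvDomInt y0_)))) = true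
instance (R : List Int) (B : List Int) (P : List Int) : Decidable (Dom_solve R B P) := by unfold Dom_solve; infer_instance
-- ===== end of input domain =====

-- B replaces the two difference-summing loops with the closed-form telescoping value (last - first per list).


-- ===== PORT A =====
-- literal port: r,b = 0,0; if len(P)==0: two index loops summing consecutive differences; return r+b
def solve (R : List Int) (B : List Int) (P : List Int) : Int :=
  if P.length = 0 then
    let r := (PySem.List.pyRange 0 ((R.length : Int) - 1) 1).foldl
      (fun r i => r + (PySem.List.pyGetD R (i + 1) 0 - PySem.List.pyGetD R i 0)) 0
    let b := (PySem.List.pyRange 0 ((B.length : Int) - 1) 1).foldl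
      (fun b i => b + (PySem.List.pyGetD B (i + 1) 0 - PySem.List.pyGetD B i 0)) 0
    r + b
  else
    0 + 0

-- ===== PORT B =====
-- port of Source B: closed form, X[-1] - X[0] for nonempty X, 0 when P is nonempty
def solve_alt (R : List Int) (B : List Int) (P : List Int) : Int :=
  if P ≠ [] then 0
  else
    (if R ≠ [] then PySem.List.pyGetD R (-1) 0 - PySem.List.pyGetD R 0 0 else 0) +
    (if B ≠ [] then PySem.List.pyGetD B (-1) 0 - PySem.List.pyGetD B 0 0 else 0)

-- ===== PRECONDITION & SPEC =====
def Spec_solve (R : List Int) (B : List Int) (P : List Int) (out : Int) : Prop := out = solve_alt R B P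
instance (R : List Int) (B : List Int) (P : List Int) (out : Int) : Decidable (Spec_solve R B P out) := by unfold Spec_solve; infer_instance

-- ===== CLAIM (what is proved, stated in full; the proofs are below) =====
def Claim_equal_solve : Prop := ∀ (R : List Int) (B : List Int) (P : List Int), Dom_solve R B P → Spec_solve R B P (solve R B P)

-- ===== LEMMAS AND PROOFS =====

-- telescoping sum over range(n)
theorem pv_tsum (g : Int → Int) (n : Nat) :
    ((PySem.List.pyRange 0 (n : Int) 1).map (fun i => g (i + 1) - g i)).sum = g n - g 0 := by
  induction n with
  | zero => simp [PySem.List.pyRange_one_eq_nil]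
  | succ n ih =>
      have h : ((n : Int) + 1) = ((n + 1 : Nat) : Int) := by push_cast; ring
      rw [← h, PySem.List.pyRange_one_succ_right (by positivity)]
      simp only [List.map_append, List.sum_append, ih, List.map_cons, List.map_nil,
        List.sum_cons, List.sum_nil]
      rw [h]; ring

-- A's loop over one list equals B's closed form
theorem pv_loop_eq (l : List Int) :
    (PySem.List.pyRange 0 ((l.length : Int) - 1) 1).foldl
      (fun r i => r + (PySem.List.pyGetD l (i + 1) 0 - PySem.List.pyGetD l i 0)) 0
    = if l ≠ [] then PySem.List.pyGetD l (-1) 0 - PySem.List.pyGetD l 0 0 else 0 := by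
  rcases l with _ | ⟨x, xs⟩
  · simp [PySem.List.pyRange_one_eq_nil]
  · have hne : (x :: xs) ≠ [] := by simp
    simp only [hne, if_pos, ne_eq, not_false_eq_true]
    rw [PySem.List.foldl_add]
    have hlen : (((x :: xs).length : Int) - 1) = ((xs.length : Nat) : Int) := by
      simp
    rw [hlen, pv_tsum (fun i => PySem.List.pyGetD (x :: xs) i 0) xs.length]
    simp only [zero_add]
    congr 1
    rw [PySem.List.pyGetD_neg_one (x :: xs) 0 hne, PySem.List.pyGetD_natCast,
      List.getLast_eq_getElem, List.getD_eq_getElem?_getD,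
      List.getElem?_eq_getElem (by simp)]
    rfl

-- ===== VERDICT (by name: the statement is the Claim_ definition above) =====
theorem solve_spec : Claim_equal_solve := by
  intro R B P _
  unfold Spec_solve solve solve_alt
  by_cases hP : P = []
  · subst hP
    simp only [List.length_nil, ne_eq, not_true_eq_false, if_neg, not_false_eq_true]
    rw [pv_loop_eq R, pv_loop_eq B]
    simp
  · have : P.length ≠ 0 := by simpa using hP
    simp [this, hP]
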